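-- pv_equiv track=rewrite | github.com/BooMBoTTess/Trainings_repo | codewars/multitapkeypad.py | presses
-- ===== SOURCE A (Python) =====
-- def presses(phrase: str):
--     phone = ['1adgjmptw* #', 'behknqux0', 'cfilorvy', '234568sz', '79']
--     phrase = phrase.lower()
--     score = 0
--     for letter in phrase:
--         for i in range(len(phone)):
--             if phone[i].find(letter) != -1:
--                 score += i+1
--     return score
-- ===== SOURCE B (Python) =====
-- def presses(phrase: str):
--     phone = ['1adgjmptw* #', 'behknqux0', 'cfilorvy', '234568sz', '79']
--     freq = {}
--     for ch in phrase.lower():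
--         freq[ch] = freq.get(ch, 0) + 1
--     return sum((i + 1) * sum(freq.get(ch, 0) for ch in row)
--                for i, row in enumerate(phone))
-- ===== Notes on version B (the rewrite author's own statement) =====
-- stated objective: faster
-- what changed: B builds a character histogram of the lowered phrase in one pass, then transposes the loop: it iterates over the fixed keypad rows summing (row index + 1) times the frequency of each row character, instead of A's per-phrase-character scan of all rows with str.find.
import Mathlib
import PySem

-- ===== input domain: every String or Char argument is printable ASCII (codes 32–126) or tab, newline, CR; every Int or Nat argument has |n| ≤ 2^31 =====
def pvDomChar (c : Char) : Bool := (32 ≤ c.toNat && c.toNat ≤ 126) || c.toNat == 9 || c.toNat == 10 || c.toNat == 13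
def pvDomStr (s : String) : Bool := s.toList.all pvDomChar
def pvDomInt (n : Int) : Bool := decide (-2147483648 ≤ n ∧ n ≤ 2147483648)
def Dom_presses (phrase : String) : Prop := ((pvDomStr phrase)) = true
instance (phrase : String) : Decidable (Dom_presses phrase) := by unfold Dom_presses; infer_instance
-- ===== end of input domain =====

-- B tallies a character histogram of the lowered phrase once, then sums (i+1)*frequency
-- over the fixed keypad rows (loop transposed onto the table; objective: alternative).


-- ===== PORT A =====
-- phone = ['1adgjmptw* #', 'behknqux0', 'cfilorvy', '234568sz', '79']
def pvPhone : List String := ["1adgjmptw* #", "behknqux0", "cfilorvy", "234568sz", "79"]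

def presses (phrase : String) : Int :=
  let phrase2 := PySem.Str.lower phrase
  phrase2.toList.foldl (fun score letter =>
    (PySem.List.pyRange 0 (pvPhone.length : Int) 1).foldl (fun score i =>
      if PySem.Str.find (PySem.List.pyGetD pvPhone i "") (String.ofList [letter]) ≠ -1
      then score + (i + 1) else score) score) 0

-- ===== PORT B =====
-- freq = {}; for ch in phrase.lower(): freq[ch] = freq.get(ch, 0) + 1
-- return sum((i+1) * sum(freq.get(ch, 0) for ch in row) for i, row in enumerate(phone))
def presses_alt (phrase : String) : Int :=
  let freq : PySem.Dict Char Int :=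
    (PySem.Str.lower phrase).toList.foldl
      (fun d ch => d.insert ch (d.getD ch 0 + 1)) PySem.Dict.empty
  ((PySem.List.enumerate pvPhone).map (fun p =>
    (p.1 + 1) * (p.2.toList.map (fun ch => freq.getD ch 0)).sum)).sum

-- ===== PRECONDITION & SPEC =====
def Spec_presses (phrase : String) (out : Int) : Prop := out = presses_alt phrase
instance (phrase : String) (out : Int) : Decidable (Spec_presses phrase out) := by unfold Spec_presses; infer_instance

-- ===== CLAIM (what is proved, stated in full; the proofs are below) =====
def Claim_equal_presses : Prop := ∀ (phrase : String), Dom_presses phrase → Spec_presses phrase (presses phrase)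

-- ===== LEMMAS AND PROOFS =====

-- A's inner loop over the 5 rows, with starting score 0, written as a sum.
def pvRowSum (c : Char) : Int :=
  ((PySem.List.pyRange 0 (pvPhone.length : Int) 1).map
    (fun i => if PySem.Str.find (PySem.List.pyGetD pvPhone i "") (String.ofList [c]) ≠ -1
              then i + 1 else 0)).sum

-- B's table sum evaluated at an abstract per-character weight f.
def pvB (f : Char → Int) : Int :=
  ((PySem.List.enumerate pvPhone).map (fun p =>
    (p.1 + 1) * (p.2.toList.map f).sum)).sum

lemma inner_shift (c : Char) (s : Int) :
    (PySem.List.pyRange 0 (pvPhone.length : Int) 1).foldl (fun score i =>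
      if PySem.Str.find (PySem.List.pyGetD pvPhone i "") (String.ofList [c]) ≠ -1
      then score + (i + 1) else score) s = s + pvRowSum c := by
  rw [show (fun score i =>
      if PySem.Str.find (PySem.List.pyGetD pvPhone i "") (String.ofList [c]) ≠ -1
      then score + (i + 1) else score)
    = (fun score i => score + (if PySem.Str.find (PySem.List.pyGetD pvPhone i "") (String.ofList [c]) ≠ -1
      then i + 1 else 0)) by funext sc i; split <;> simp]
  exact PySem.List.foldl_add _ _ _

-- The characters that occur in some keypad row.
def pvKeyChars : List Char :=
  ['1','a','d','g','j','m','p','t','w','*',' ','#','b','e','h','k','n','q','u','x','0',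
   'c','f','i','l','o','r','v','y','2','3','4','5','6','8','s','z','7','9']

lemma pvB_add (f g : Char → Int) :
    pvB (fun ch => f ch + g ch) = pvB f + pvB g := by
  unfold pvB pvPhone
  simp [PySem.List.enumerate, List.map, List.sum, mul_add]
  ring

set_option maxRecDepth 8192 in
set_option maxHeartbeats 1000000 in
lemma perChar (c : Char) :
    pvB (fun ch => if c == ch then (1 : Int) else 0) = pvRowSum c := by
  by_cases hc : c ∈ pvKeyChars
  · unfold pvKeyChars at hc
    fin_cases hc <;> decide
  · have hkeys : ∀ row ∈ pvPhone, row.toList ⊆ pvKeyChars := by decide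
    have hno : ∀ row ∈ pvPhone, ∀ ch ∈ row.toList, (c == ch) = false := by
      intro row hr ch hch
      exact beq_eq_false_iff_ne.2 (fun e => hc (e ▸ hkeys row hr hch))
    have hz : ∀ row ∈ pvPhone,
        (row.toList.map (fun ch => if c == ch then (1 : Int) else 0)).sum = 0 := by
      intro row hr
      rw [List.sum_eq_zero]
      intro x hx
      obtain ⟨ch, hch, rfl⟩ := List.mem_map.1 hx
      rw [hno row hr ch hch]; rfl
    have e : ∀ row ∈ pvPhone, PySem.Str.find row (String.ofList [c]) = -1 := by
      intro row hr
      rw [PySem.Str.find_eq_neg_one_iff]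
      simp only [String.toList_ofList]
      rw [List.singleton_infix_iff]
      exact fun h => hc (hkeys row hr h)
    unfold pvB pvRowSum
    rw [show PySem.List.pyRange 0 (pvPhone.length : Int) 1 = [0,1,2,3,4] from by decide,
        show PySem.List.enumerate pvPhone
          = [(0, "1adgjmptw* #"), (1, "behknqux0"), (2, "cfilorvy"), (3, "234568sz"), (4, "79")] from by decide]
    simp only [List.map_cons, List.map_nil, List.sum_cons, List.sum_nil]
    rw [show PySem.List.pyGetD pvPhone 0 "" = "1adgjmptw* #" from by decide,
        show PySem.List.pyGetD pvPhone 1 "" = "behknqux0" from by decide,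
        show PySem.List.pyGetD pvPhone 2 "" = "cfilorvy" from by decide,
        show PySem.List.pyGetD pvPhone 3 "" = "234568sz" from by decide,
        show PySem.List.pyGetD pvPhone 4 "" = "79" from by decide,
        e "1adgjmptw* #" (by decide), e "behknqux0" (by decide),
        e "cfilorvy" (by decide), e "234568sz" (by decide), e "79" (by decide),
        hz "1adgjmptw* #" (by decide), hz "behknqux0" (by decide),
        hz "cfilorvy" (by decide), hz "234568sz" (by decide), hz "79" (by decide)]
    simp

-- Double counting: summing A's per-character score over the phrase equals
-- B's table sum over per-character occurrence counts.
lemma main_count (l : List Char) :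
    (l.map pvRowSum).sum = pvB (fun ch => (l.count ch : Int)) := by
  induction l with
  | nil =>
    simp only [List.map_nil, List.sum_nil, List.count_nil, Int.natCast_zero]
    rw [show (fun (_ : Char) => (0 : Int)) = (fun ch => (0 : Int) + 0) from by funext _; ring,
        pvB_add]
    have h0 : pvB (fun _ => (0 : Int)) = 0 := by decide
    rw [h0]; ring
  | cons c t ih =>
    have hcnt : (fun ch => (((c :: t).count ch : Nat) : Int))
        = (fun ch => ((t.count ch : Nat) : Int) + (if c == ch then (1 : Int) else 0)) := by
      funext ch
      rw [List.count_cons]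
      by_cases h : c = ch
      · simp [h]
      · simp [h]
    simp only [List.map_cons, List.sum_cons]
    rw [ih, hcnt, pvB_add, perChar]
    ring

lemma outer_fold (l : List Char) (s : Int) :
    l.foldl (fun score letter =>
      (PySem.List.pyRange 0 (pvPhone.length : Int) 1).foldl (fun score i =>
        if PySem.Str.find (PySem.List.pyGetD pvPhone i "") (String.ofList [letter]) ≠ -1
        then score + (i + 1) else score) score) s
    = s + (l.map pvRowSum).sum := by
  induction l generalizing s with
  | nil => simp
  | cons c t ih =>
    simp only [List.foldl_cons, List.map_cons, List.sum_cons]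
    rw [inner_shift, ih]
    ring

-- ===== VERDICT (by name: the statement is the Claim_ definition above) =====
theorem presses_spec : Claim_equal_presses := by
  intro phrase _
  unfold Spec_presses presses presses_alt
  rw [outer_fold, main_count]
  have hfreq : ∀ ch, (((PySem.Str.lower phrase).toList.foldl
      (fun d ch => d.insert ch (d.getD ch 0 + 1)) PySem.Dict.empty).getD ch 0)
      = ((PySem.Str.lower phrase).toList.count ch : Int) := by
    intro ch
    rw [PySem.Dict.getD_foldl_insert_add_one]
    simp [PySem.Dict.empty, PySem.Dict.getD, PySem.Dict.get?]
  unfold pvB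
  simp only [hfreq, zero_add]
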